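-- pv_equiv track=rewrite | github.com/pclumson1/Python3_Algorithms | arrayMutation.py | mutateTheArray
-- ===== SOURCE A (Python) =====
-- def mutateTheArray(n, a):
--     if n == 1:
--         return a
--
--     b = []
--
--     for i in range(n):
--         if i == 0:
--             x, y, z = 0, a[i], a[i + 1]
--         elif i == n - 1:
--             x, y, z = a[i - 1], a[i], 0
--         else:
--             x, y, z = a[i - 1], a[i], a[i + 1]
--
--         b.append(x + y + z)
--
--     return b
-- ===== SOURCE B (Python) =====
-- def mutateTheArray(n, a):
--     if n == 1:
--         return a
--     # prefix sums: pre[k] = a[0] + ... + a[k-1]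
--     pre = [0]
--     for i in range(n):
--         pre.append(pre[-1] + a[i])
--     # window sum = difference of two prefix sums, clamped at the ends
--     return [pre[min(i + 2, n)] - pre[max(i - 1, 0)] for i in range(n)]
-- ===== Notes on version B (the rewrite author's own statement) =====
-- stated objective: alternative
-- what changed: Replaces A's per-element three-branch neighbour additions with a prefix-sum array built first, each output then computed as a difference of two clamped prefix sums instead of adding neighbours.
import Mathlib
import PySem

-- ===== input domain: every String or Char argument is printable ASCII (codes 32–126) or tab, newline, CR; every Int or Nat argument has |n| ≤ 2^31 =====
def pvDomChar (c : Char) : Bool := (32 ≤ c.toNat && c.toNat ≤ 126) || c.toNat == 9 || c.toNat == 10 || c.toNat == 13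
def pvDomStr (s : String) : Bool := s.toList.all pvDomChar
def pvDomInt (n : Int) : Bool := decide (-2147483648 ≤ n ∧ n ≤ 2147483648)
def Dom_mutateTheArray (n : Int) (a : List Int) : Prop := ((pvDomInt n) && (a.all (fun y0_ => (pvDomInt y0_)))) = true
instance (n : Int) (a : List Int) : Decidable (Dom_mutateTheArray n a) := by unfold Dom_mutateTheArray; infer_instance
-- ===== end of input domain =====

-- B replaces A's three-branch neighbour additions with a prefix-sum array built first; each output is a difference of two clamped prefix sums (alternative decomposition; same cost).


-- ===== PORT A =====
def mutateTheArray (n : Int) (a : List Int) : List Int :=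
  if n = 1 then a
  else
    (PySem.List.pyRange 0 n 1).foldl (fun b i =>
      b ++ [(if i = 0 then
               (0, PySem.List.pyGetD a i 0, PySem.List.pyGetD a (i + 1) 0)
             else if i = n - 1 then
               (PySem.List.pyGetD a (i - 1) 0, PySem.List.pyGetD a i 0, 0)
             else
               (PySem.List.pyGetD a (i - 1) 0, PySem.List.pyGetD a i 0, PySem.List.pyGetD a (i + 1) 0) :
             Int × Int × Int).1 +
            (if i = 0 then
               (0, PySem.List.pyGetD a i 0, PySem.List.pyGetD a (i + 1) 0)
             else if i = n - 1 then
               (PySem.List.pyGetD a (i - 1) 0, PySem.List.pyGetD a i 0, 0)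
             else
               (PySem.List.pyGetD a (i - 1) 0, PySem.List.pyGetD a i 0, PySem.List.pyGetD a (i + 1) 0) :
             Int × Int × Int).2.1 +
            (if i = 0 then
               (0, PySem.List.pyGetD a i 0, PySem.List.pyGetD a (i + 1) 0)
             else if i = n - 1 then
               (PySem.List.pyGetD a (i - 1) 0, PySem.List.pyGetD a i 0, 0)
             else
               (PySem.List.pyGetD a (i - 1) 0, PySem.List.pyGetD a i 0, PySem.List.pyGetD a (i + 1) 0) :
             Int × Int × Int).2.2]) []

-- ===== PORT B =====
-- prefix-sum loop `pre = [0]; for i in range(n): pre.append(pre[-1] + a[i])`,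
-- then one comprehension of clamped prefix-sum differences
def mutateTheArray_alt (n : Int) (a : List Int) : List Int :=
  if n = 1 then a
  else
    let pre := (PySem.List.pyRange 0 n 1).foldl
      (fun pre i => pre ++ [PySem.List.pyGetD pre (-1) 0 + PySem.List.pyGetD a i 0]) [0]
    (PySem.List.pyRange 0 n 1).map (fun i =>
      PySem.List.pyGetD pre (min (i + 2) n) 0 - PySem.List.pyGetD pre (max (i - 1) 0) 0)

-- ===== PRECONDITION & SPEC =====
-- Pre_ excludes exactly the inputs where Python A raises IndexError: n ≥ 2 with fewer than n elements.
def Pre_mutateTheArray (n : Int) (a : List Int) : Prop := n = 1 ∨ n ≤ a.length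
instance (n : Int) (a : List Int) : Decidable (Pre_mutateTheArray n a) := by
  unfold Pre_mutateTheArray; infer_instance
def pvWitness_mutateTheArray : Int × List Int := (3, [1, 2, 3])

def Spec_mutateTheArray (n : Int) (a : List Int) (out : List Int) : Prop := out = mutateTheArray_alt n a
instance (n : Int) (a : List Int) (out : List Int) : Decidable (Spec_mutateTheArray n a out) := by unfold Spec_mutateTheArray; infer_instance

-- ===== CLAIM (what is proved, stated in full; the proofs are below) =====
def Claim_equal_mutateTheArray : Prop := ∀ (n : Int) (a : List Int), Dom_mutateTheArray n a → Pre_mutateTheArray n a → Spec_mutateTheArray n a (mutateTheArray n a)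

-- ===== LEMMAS AND PROOFS =====

-- one step of a prefix-sum: sum of (k+1)-prefix = sum of k-prefix plus a[k]
theorem sum_take_succ (a : List Int) (k : Nat) (h : k < a.length) :
    (a.take (k + 1)).sum = (a.take k).sum + a.getD k 0 := by
  rw [List.take_add_one, List.sum_append, List.getD_eq_getElem?_getD,
    List.getElem?_eq_getElem h]
  simp

-- the foldl builds the table of prefix sums [S₀, S₁, …, Sₘ]
theorem pre_eq (a : List Int) (m : Nat) (hm : m ≤ a.length) :
    (PySem.List.pyRange 0 m 1).foldl
      (fun pre i => pre ++ [PySem.List.pyGetD pre (-1) 0 + PySem.List.pyGetD a i 0]) [0]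
    = (List.range (m + 1)).map (fun k => (a.take k).sum) := by
  induction m with
  | zero => simp [PySem.List.pyRange_one_eq_nil]
  | succ m ih =>
    have h1 : PySem.List.pyRange 0 (((m : Nat) + 1 : Nat) : Int) 1
        = PySem.List.pyRange 0 (m : Nat) 1 ++ [((m : Nat) : Int)] := by
      have := PySem.List.pyRange_one_succ_right (a := 0) (b := (m : Nat)) (by positivity)
      simpa using this
    rw [h1, List.foldl_append, ih (by omega)]
    have hlast : PySem.List.pyGetD ((List.range (m + 1)).map (fun k => (a.take k).sum)) (-1) 0
        = (a.take m).sum := by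
      have : (List.range (m + 1)).map (fun k => (a.take k).sum)
          = (List.range m).map (fun k => (a.take k).sum) ++ [(a.take m).sum] := by
        rw [List.range_succ, List.map_append]; simp
      rw [this, PySem.List.pyGetD_neg_one_append_singleton]
    simp only [List.foldl_cons, List.foldl_nil, hlast]
    rw [show ((List.range (m + 1 + 1)).map fun k => (a.take k).sum)
        = (List.range (m + 1)).map (fun k => (a.take k).sum) ++ [(a.take (m + 1)).sum] by
      rw [List.range_succ, List.map_append]; simp]
    congr 1
    rw [sum_take_succ a m (by omega)]
    simp

theorem mutateTheArray_eq (n : Int) (a : List Int) (h : Pre_mutateTheArray n a) :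
    mutateTheArray n a = mutateTheArray_alt n a := by
  by_cases h1 : n = 1
  · simp [mutateTheArray, mutateTheArray_alt, h1]
  · by_cases h0 : n ≤ 0
    · simp [mutateTheArray, mutateTheArray_alt, h1, PySem.List.pyRange_one_eq_nil h0]
    · have hn2 : 2 ≤ n := by omega
      have hlen : n ≤ (a.length : Int) := by
        rcases h with h | h
        · omega
        · exact_mod_cast h
      simp only [mutateTheArray, mutateTheArray_alt, if_neg h1]
      have hnn : n = ((n.toNat : Nat) : Int) := by omega
      rw [PySem.List.foldl_append_singleton_eq_map]
      rw [show (PySem.List.pyRange 0 n 1).foldl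
            (fun pre i => pre ++ [PySem.List.pyGetD pre (-1) 0 + PySem.List.pyGetD a i 0]) [0]
          = (List.range (n.toNat + 1)).map (fun k => (a.take k).sum) by
        rw [hnn]; exact pre_eq a n.toNat (by omega)]
      simp only [List.nil_append]
      apply List.map_congr_left
      intro i hi
      rw [PySem.List.mem_pyRange_one] at hi
      obtain ⟨hi0, hin⟩ := hi
      have hget : ∀ j : Int, 0 ≤ j → j ≤ n →
          PySem.List.pyGetD ((List.range (n.toNat + 1)).map (fun k => (a.take k).sum)) j 0
          = (a.take j.toNat).sum := by
        intro j hj0 hjn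
        rw [PySem.List.pyGetD_of_nonneg _ 0 hj0, List.getD_eq_getElem?_getD,
          List.getElem?_map, List.getElem?_range (by omega)]
        simp
      have hA : ∀ j : Int, 0 ≤ j → PySem.List.pyGetD a j 0 = a.getD j.toNat 0 :=
        fun j hj => PySem.List.pyGetD_of_nonneg a 0 hj
      by_cases hz : i = 0
      · subst hz
        rw [if_pos rfl, hget (min (0 + 2) n) (by omega) (by omega),
          hget (max (0 - 1) 0) (by omega) (by omega)]
        have hmin : (min ((0 : Int) + 2) n).toNat = 2 := by omega
        have hmax : (max ((0 : Int) - 1) 0).toNat = 0 := by omega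
        rw [hmin, hmax, hA 0 (by omega), hA (0 + 1) (by omega)]
        rw [sum_take_succ a 1 (by omega), sum_take_succ a 0 (by omega)]
        norm_num
      · by_cases hl : i = n - 1
        · subst hl
          rw [if_neg hz, if_pos rfl, hget (min (n - 1 + 2) n) (by omega) (by omega),
            hget (max (n - 1 - 1) 0) (by omega) (by omega)]
          have hmin : (min (n - 1 + 2) n).toNat = n.toNat := by omega
          have hmax : (max (n - 1 - 1) 0).toNat = n.toNat - 2 := by omega
          rw [hmin, hmax, hA (n - 1 - 1) (by omega), hA (n - 1) (by omega)]
          have e1 : n.toNat = (n.toNat - 1) + 1 := by omega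
          have e2 : n.toNat - 1 = (n.toNat - 2) + 1 := by omega
          rw [e1, sum_take_succ a (n.toNat - 1) (by omega), e2,
            sum_take_succ a (n.toNat - 2) (by omega)]
          have e3 : (n - 1 - 1).toNat = n.toNat - 2 := by omega
          have e4 : (n - 1).toNat = (n.toNat - 2) + 1 := by omega
          rw [e3, e4]
          have f1 : n.toNat - 2 + 1 + 1 - 2 = n.toNat - 2 := by omega
          rw [f1]; ring
        · rw [if_neg hz, if_neg hl, hget (min (i + 2) n) (by omega) (by omega),
            hget (max (i - 1) 0) (by omega) (by omega)]
          have hmin : (min (i + 2) n).toNat = i.toNat + 2 := by omega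
          have hmax : (max (i - 1) 0).toNat = i.toNat - 1 := by omega
          rw [hmin, hmax, hA (i - 1) (by omega), hA i hi0, hA (i + 1) (by omega)]
          have e1 : i.toNat + 2 = (i.toNat + 1) + 1 := by omega
          have e2 : i.toNat + 1 = (i.toNat - 1 + 1) + 1 := by omega
          rw [e1, sum_take_succ a (i.toNat + 1) (by omega), e2,
            sum_take_succ a (i.toNat - 1 + 1) (by omega),
            sum_take_succ a (i.toNat - 1) (by omega)]
          have e3 : (i - 1).toNat = i.toNat - 1 := by omega
          have e4 : (i + 1).toNat = i.toNat - 1 + 1 + 1 := by omega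
          have e5 : i.toNat = i.toNat - 1 + 1 := by omega
          rw [e3, e4]
          conv_lhs => rw [e5]
          have f1 : i.toNat - 1 + 1 - 1 = i.toNat - 1 := by omega
          rw [f1]; ring

-- ===== VERDICT (by name: the statement is the Claim_ definition above) =====
theorem mutateTheArray_spec : Claim_equal_mutateTheArray := by
  intro n a _ hpre
  unfold Spec_mutateTheArray
  exact mutateTheArray_eq n a hpre
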